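-- pv_equiv track=rewrite | github.com/rshu/Agent_Eval | agent_eval/generate/patch_parser.py | _unquote_path
-- ===== SOURCE A (Python) =====
-- def _unquote_path(raw: str) -> str:
--     r"""Remove surrounding double-quotes and unescape a git-quoted path.
--
--     Git quotes paths containing special characters (spaces, non-ASCII, etc.)
--     as C-style strings: ``"path/with spaces/file.txt"``.  Non-ASCII bytes are
--     encoded as octal sequences like ``\303\251`` (UTF-8 for ``é``).
--     """
--     if not (raw.startswith('"') and raw.endswith('"')):
--         return raw
--
--     raw = raw[1:-1]
--
--     # Decode escape sequences (including octal) into raw bytes, then decode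
--     # as UTF-8.  We process byte-by-byte to handle mixed ASCII + octal.
--     out: list[int] = []
--     i = 0
--     while i < len(raw):
--         if raw[i] == '\\' and i + 1 < len(raw):
--             nxt = raw[i + 1]
--             if nxt == '\\':
--                 out.append(ord('\\'))
--                 i += 2
--             elif nxt == '"':
--                 out.append(ord('"'))
--                 i += 2
--             elif nxt == 'n':
--                 out.append(ord('\n'))
--                 i += 2
--             elif nxt == 't':
--                 out.append(ord('\t'))
--                 i += 2
--             elif nxt in '01234567':
--                 # Octal: up to 3 digits
--                 end = i + 2
--                 while end < len(raw) and end < i + 4 and raw[end] in '01234567':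
--                     end += 1
--                 out.append(int(raw[i + 1:end], 8))
--                 i = end
--             else:
--                 out.append(ord(raw[i]))
--                 i += 1
--         else:
--             out.append(ord(raw[i]))
--             i += 1
--
--     return bytes(out).decode("utf-8", errors="replace")
-- ===== SOURCE B (Python) =====
-- def _unquote_path(raw: str) -> str:
--     """Unquote a git-quoted C-style path: split once on backslash and resolve
--     each escape from the head of the following segment (segment bodies are
--     bulk-copied instead of being scanned char by char)."""
--     if not (raw.startswith('"') and raw.endswith('"')):
--         return raw
--     parts = raw[1:-1].split('\\')
--     out = [ord(c) for c in parts[0]]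
--     k = 1
--     while k < len(parts):
--         part = parts[k]
--         if part == '':
--             # escaped backslash (consumes the next separator) or a trailing one
--             out.append(92)
--             k += 1
--             if k < len(parts):
--                 out.extend(ord(c) for c in parts[k])
--                 k += 1
--         else:
--             c = part[0]
--             if c == '"':
--                 out.append(34)
--                 rest = part[1:]
--             elif c == 'n':
--                 out.append(10)
--                 rest = part[1:]
--             elif c == 't':
--                 out.append(9)
--                 rest = part[1:]
--             elif c in '01234567':
--                 v = ord(c) - 48
--                 j = 1
--                 while j < 3 and j < len(part) and part[j] in '01234567':
--                     v = v * 8 + (ord(part[j]) - 48)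
--                     j += 1
--                 out.append(v)
--                 rest = part[j:]
--             else:
--                 # unknown escape: keep the backslash, segment is literal
--                 out.append(92)
--                 rest = part
--             out.extend(ord(c) for c in rest)
--             k += 1
--     return bytes(out).decode("utf-8", errors="replace")
-- ===== Notes on version B (the rewrite author's own statement) =====
-- stated objective: alternative
-- what changed: Replaces the char-by-char index scan with a single split on backslash: literal segments are bulk-copied and each escape is resolved from the head of the following segment.
import Mathlib
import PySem

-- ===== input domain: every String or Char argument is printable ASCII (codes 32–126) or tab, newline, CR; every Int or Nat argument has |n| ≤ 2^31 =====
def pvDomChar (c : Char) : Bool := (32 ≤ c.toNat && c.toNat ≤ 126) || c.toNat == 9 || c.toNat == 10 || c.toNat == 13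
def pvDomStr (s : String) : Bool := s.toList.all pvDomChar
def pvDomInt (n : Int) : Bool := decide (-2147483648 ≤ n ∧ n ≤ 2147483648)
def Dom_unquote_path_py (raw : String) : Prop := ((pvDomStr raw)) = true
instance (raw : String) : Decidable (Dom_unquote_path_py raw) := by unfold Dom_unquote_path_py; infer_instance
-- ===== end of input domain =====

-- B replaces A's char-by-char index scan by one split on backslash with bulk-copied
-- literal segments (objective: alternative decomposition, same asymptotic cost).

-- Shared helper: Python's  bytes(out).decode("utf-8", errors="replace")  (both A and B
-- end with this very call).  Hand-ported, exact for byte values 0..255 (CPython replaces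
-- maximal subparts of invalid sequences by U+FFFD; verified against CPython).
def pvFFFD : Char := Char.ofNat 0xFFFD

def pvContOk (b : Int) : Bool := 128 ≤ b && b ≤ 191

theorem pvLen1 {α : Type} (a : α) (l : List α) : l.length < (a :: l).length :=
  Nat.lt_succ_self l.length
theorem pvLen2 {α : Type} (a b : α) (l : List α) : l.length < (a :: b :: l).length :=
  Nat.lt_succ_of_lt (pvLen1 b l)
theorem pvLen3 {α : Type} (a b c : α) (l : List α) : l.length < (a :: b :: c :: l).length :=
  Nat.lt_succ_of_lt (pvLen2 b c l)
theorem pvLen4 {α : Type} (a b c d : α) (l : List α) : l.length < (a :: b :: c :: d :: l).length :=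
  Nat.lt_succ_of_lt (pvLen3 b c d l)

def pvUtf8DecodeReplace : List Int → List Char
  | [] => []
  | b :: rest =>
    if b < 128 then Char.ofNat b.toNat :: pvUtf8DecodeReplace rest
    else if b < 194 then pvFFFD :: pvUtf8DecodeReplace rest
    else if b < 224 then
      match rest with
      | b2 :: rest2 =>
        if pvContOk b2 then Char.ofNat (64 * (b - 192) + (b2 - 128)).toNat :: pvUtf8DecodeReplace rest2
        else pvFFFD :: pvUtf8DecodeReplace (b2 :: rest2)
      | [] => [pvFFFD]
    else if b < 240 then
      let lo : Int := if b = 224 then 160 else 128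
      let hi : Int := if b = 237 then 159 else 191
      match rest with
      | b2 :: rest2 =>
        if lo ≤ b2 && b2 ≤ hi then
          match rest2 with
          | b3 :: rest3 =>
            if pvContOk b3 then
              Char.ofNat (4096 * (b - 224) + 64 * (b2 - 128) + (b3 - 128)).toNat :: pvUtf8DecodeReplace rest3
            else pvFFFD :: pvUtf8DecodeReplace (b3 :: rest3)
          | [] => [pvFFFD]
        else pvFFFD :: pvUtf8DecodeReplace (b2 :: rest2)
      | [] => [pvFFFD]
    else if b < 245 then
      let lo : Int := if b = 240 then 144 else 128
      let hi : Int := if b = 244 then 143 else 191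
      match rest with
      | b2 :: rest2 =>
        if lo ≤ b2 && b2 ≤ hi then
          match rest2 with
          | b3 :: rest3 =>
            if pvContOk b3 then
              match rest3 with
              | b4 :: rest4 =>
                if pvContOk b4 then
                  Char.ofNat (262144 * (b - 240) + 4096 * (b2 - 128) + 64 * (b3 - 128) + (b4 - 128)).toNat
                    :: pvUtf8DecodeReplace rest4
                else pvFFFD :: pvUtf8DecodeReplace (b4 :: rest4)
              | [] => [pvFFFD]
            else pvFFFD :: pvUtf8DecodeReplace (b3 :: rest3)
          | [] => [pvFFFD]
        else pvFFFD :: pvUtf8DecodeReplace (b2 :: rest2)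
      | [] => [pvFFFD]
    else pvFFFD :: pvUtf8DecodeReplace rest
termination_by l => l.length
decreasing_by
  all_goals first
  | exact pvLen1 _ _
  | exact pvLen2 _ _ _
  | exact pvLen3 _ _ _ _
  | exact pvLen4 _ _ _ _ _

-- Python's  c in '01234567'  for a single char: membership in these eight chars.
def pvOct : List Char := ['0', '1', '2', '3', '4', '5', '6', '7']

-- ===== PORT A =====
-- inner while computing `end`:  end = i + 2; while end < len(raw) and end < i + 4 and raw[end] in '01234567': end += 1
def aEndLoop (cs : List Char) (i : Nat) (e : Nat) : Nat :=
  if h : e < cs.length ∧ e < i + 4 ∧ pvOct.contains (cs.getD e ' ') then aEndLoop cs i (e + 1) else e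
termination_by i + 4 - e
decreasing_by exact Nat.sub_lt_sub_left h.2.1 (Nat.lt_succ_self e)

theorem aEndLoop_ge (cs : List Char) (i : Nat) : ∀ e, e ≤ aEndLoop cs i e := by
  intro e
  induction e using aEndLoop.induct cs i with
  | case1 e h ih => rw [aEndLoop, dif_pos h]; omega
  | case2 e h => rw [aEndLoop, dif_neg h]

-- the main while loop of A (out is the accumulated byte list; raw[i] is cs.getD i ' ',
-- always guarded by i < cs.length, so getD is exact)
def aLoop (cs : List Char) (i : Nat) (out : List Int) : List Int :=
  if hl : i < cs.length then
    if cs.getD i ' ' = '\\' ∧ i + 1 < cs.length then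
      -- nxt = raw[i + 1], end = the inner while's result (both inlined)
      if cs.getD (i + 1) ' ' = '\\' then aLoop cs (i + 2) (out ++ [92])
      else if cs.getD (i + 1) ' ' = '"' then aLoop cs (i + 2) (out ++ [34])
      else if cs.getD (i + 1) ' ' = 'n' then aLoop cs (i + 2) (out ++ [10])
      else if cs.getD (i + 1) ' ' = 't' then aLoop cs (i + 2) (out ++ [9])
      else if pvOct.contains (cs.getD (i + 1) ' ') then
        -- int(raw[i+1:end], 8); the digits are always a valid octal literal, so getD 0 never fires
        aLoop cs (aEndLoop cs i (i + 2)) (out ++ [(PySem.Int.ofCharsBase? (PySem.List.slice cs (some ((i + 1 : Nat) : Int)) (some ((aEndLoop cs i (i + 2) : Nat) : Int))) 8).getD 0])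
      else aLoop cs (i + 1) (out ++ [((cs.getD i ' ').toNat : Int)])
    else aLoop cs (i + 1) (out ++ [((cs.getD i ' ').toNat : Int)])
  else out
termination_by cs.length - i
decreasing_by
  all_goals first
  | exact Nat.sub_lt_sub_left hl (Nat.lt_add_of_pos_right (by decide))
  | exact Nat.sub_lt_sub_left hl
      (Nat.lt_of_lt_of_le (Nat.lt_add_of_pos_right (by decide)) (aEndLoop_ge cs i (i + 2)))

def unquote_path_py (raw : String) : String :=
  if !(PySem.Str.startswith raw "\"" && PySem.Str.endswith raw "\"") then raw
  else
    String.ofList (pvUtf8DecodeReplace (aLoop (PySem.List.slice raw.toList (some 1) (some (-1))) 0 []))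

-- ===== PORT B =====
-- Source B's while over parts[k:]: one step per escape-resolving segment
-- (an empty segment consumes the following one as a literal).
def bLoop : List (List Char) → List Int
  | [] => []
  | [] :: rest =>
    92 :: (match rest with
           | [] => []
           | lit :: rest2 => (lit.map fun c => (c.toNat : Int)) ++ bLoop rest2)
  | (c :: p) :: rest =>
    let vl : Int × List Char :=
      if c = '"' then (34, p)
      else if c = 'n' then (10, p)
      else if c = 't' then (9, p)
      else if pvOct.contains c then
        match p with
        | [] => ((c.toNat : Int) - 48, [])
        | d :: p2 =>
          if pvOct.contains d then
            match p2 with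
            | [] => (((c.toNat : Int) - 48) * 8 + ((d.toNat : Int) - 48), [])
            | e :: p3 =>
              if pvOct.contains e then
                ((((c.toNat : Int) - 48) * 8 + ((d.toNat : Int) - 48)) * 8 + ((e.toNat : Int) - 48), p3)
              else (((c.toNat : Int) - 48) * 8 + ((d.toNat : Int) - 48), e :: p3)
          else ((c.toNat : Int) - 48, d :: p2)
      else (92, c :: p)
    vl.1 :: ((vl.2.map fun c => (c.toNat : Int)) ++ bLoop rest)

def unquote_path_py_alt (raw : String) : String :=
  if !(PySem.Str.startswith raw "\"" && PySem.Str.endswith raw "\"") then raw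
  else
    let parts := PySem.Chars.splitOn (PySem.List.slice raw.toList (some 1) (some (-1))) ['\\']
    String.ofList (pvUtf8DecodeReplace ((parts.headI.map fun c => (c.toNat : Int)) ++ bLoop parts.tail))

-- ===== PRECONDITION & SPEC =====
-- Pre_ excludes exactly the inputs on which A raises ValueError in bytes(out): a quoted
-- string whose body contains an escape-starting backslash (even run of backslashes before
-- it) followed by three octal digits the first of which is ≥ '4' (byte value > 255).
-- B raises the same ValueError there; neither returns.
def Pre_unquote_path_py (raw : String) : Prop :=
  (PySem.Str.startswith raw "\"" && PySem.Str.endswith raw "\"") = true →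
    ¬ ∃ i < (PySem.List.slice raw.toList (some 1) (some (-1))).length,
      (let t := PySem.List.slice raw.toList (some 1) (some (-1))
       t.getD i ' ' = '\\' ∧
       ((t.take i).reverse.takeWhile (fun c => c = '\\')).length % 2 = 0 ∧
       (t.getD (i + 1) ' ' = '4' ∨ t.getD (i + 1) ' ' = '5' ∨ t.getD (i + 1) ' ' = '6' ∨ t.getD (i + 1) ' ' = '7') ∧
       i + 3 < t.length ∧ pvOct.contains (t.getD (i + 2) ' ') = true ∧ pvOct.contains (t.getD (i + 3) ' ') = true)
instance (raw : String) : Decidable (Pre_unquote_path_py raw) := by unfold Pre_unquote_path_py; infer_instance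

def pvWitness_unquote_path_py : String := "\"a b\\303\\251\\n\""

def Spec_unquote_path_py (raw : String) (out : String) : Prop := out = unquote_path_py_alt raw
instance (raw : String) (out : String) : Decidable (Spec_unquote_path_py raw out) := by unfold Spec_unquote_path_py; infer_instance

-- ===== CLAIM (what is proved, stated in full; the proofs are below) =====
def Claim_equal_unquote_path_py : Prop := ∀ (raw : String), Dom_unquote_path_py raw → Pre_unquote_path_py raw → Spec_unquote_path_py raw (unquote_path_py raw)

-- ===== LEMMAS AND PROOFS =====

-- structural characterisation of A's scan (escape resolution on a plain list)
def aList : List Char → List Int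
  | [] => []
  | c :: rest =>
    if c = '\\' then
      match rest with
      | [] => [92]
      | d :: rest2 =>
        if d = '\\' then 92 :: aList rest2
        else if d = '"' then 34 :: aList rest2
        else if d = 'n' then 10 :: aList rest2
        else if d = 't' then 9 :: aList rest2
        else if pvOct.contains d then
          match rest2 with
          | [] => [(d.toNat : Int) - 48]
          | e :: rest3 =>
            if pvOct.contains e then
              match rest3 with
              | [] => [((d.toNat : Int) - 48) * 8 + ((e.toNat : Int) - 48)]
              | f :: rest4 =>
                if pvOct.contains f then
                  ((((d.toNat : Int) - 48) * 8 + ((e.toNat : Int) - 48)) * 8 + ((f.toNat : Int) - 48)) :: aList rest4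
                else (((d.toNat : Int) - 48) * 8 + ((e.toNat : Int) - 48)) :: aList (f :: rest4)
            else ((d.toNat : Int) - 48) :: aList (e :: rest3)
        else 92 :: aList (d :: rest2)
    else (c.toNat : Int) :: aList rest
termination_by l => l.length
decreasing_by all_goals (simp; try omega)

-- single-separator split, structurally
def mySplit : List Char → List (List Char)
  | [] => [[]]
  | c :: rest =>
    if c = '\\' then [] :: mySplit rest
    else
      match mySplit rest with
      | [] => [[c]]
      | p :: ps => (c :: p) :: ps

def bAll (ps : List (List Char)) : List Int :=
  (ps.headI.map fun c => (c.toNat : Int)) ++ bLoop ps.tail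

theorem mySplit_ne_nil (cs : List Char) : mySplit cs ≠ [] := by
  cases cs with
  | nil => simp [mySplit]
  | cons c rest =>
    unfold mySplit
    split
    · simp
    · split <;> simp

theorem splitGo_eq (fuel : Nat) : ∀ (l cur : List Char) (acc : List (List Char)), l.length ≤ fuel →
    PySem.Chars.splitOn.go ['\\'] fuel l cur acc
      = acc.reverse ++ ((cur.reverse ++ (mySplit l).headI) :: (mySplit l).tail) := by
  induction fuel with
  | zero =>
    intro l cur acc h
    have hl : l = [] := List.eq_nil_of_length_eq_zero (by omega)
    subst hl
    simp [PySem.Chars.splitOn.go, mySplit]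
  | succ fuel ih =>
    intro l cur acc h
    cases l with
    | nil => simp [PySem.Chars.splitOn.go, mySplit]
    | cons c rest =>
      rw [PySem.Chars.splitOn.go]
      by_cases hc : c = '\\'
      · subst hc
        have hpre : (['\\'] : List Char).isPrefixOf ('\\' :: rest) = true := by
          simp [List.isPrefixOf]
        rw [if_pos hpre]
        rw [show List.drop (['\\'] : List Char).length ('\\' :: rest) = rest from rfl]
        rw [ih rest [] _ (by simpa using Nat.le_of_succ_le_succ h)]
        cases hms : mySplit rest with
        | nil => exact absurd hms (mySplit_ne_nil rest)
        | cons p ps => simp [mySplit, hms]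
      · have hpre : (['\\'] : List Char).isPrefixOf (c :: rest) = false := by
          simp [List.isPrefixOf]
          exact fun hc2 => absurd hc2.symm hc
        rw [if_neg (by simp [hpre])]
        rw [ih rest (c :: cur) _ (by simpa using Nat.le_of_succ_le_succ h)]
        cases hms : mySplit rest with
        | nil => exact absurd hms (mySplit_ne_nil rest)
        | cons p ps => simp [mySplit, hms, hc]

theorem splitOn_eq_mySplit (cs : List Char) : PySem.Chars.splitOn cs ['\\'] = mySplit cs := by
  unfold PySem.Chars.splitOn
  rw [splitGo_eq (cs.length + 1) cs [] [] (by omega)]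
  cases hms : mySplit cs with
  | nil => exact absurd hms (mySplit_ne_nil cs)
  | cons p ps => simp

theorem pvOct_ne {x : Char} (h : pvOct.contains x = true) :
    x ≠ '\\' ∧ x ≠ '"' ∧ x ≠ 'n' ∧ x ≠ 't' := by
  have hm : x ∈ pvOct := by simpa using h
  fin_cases hm <;> decide

theorem pvOct_bs : pvOct.contains '\\' = false := by decide

-- controlled unfolding of aList
theorem aList_nil : aList [] = [] := by rw [aList.eq_def]

theorem aList_cons_ne {c : Char} {r : List Char} (hc : ¬c = '\\') :
    aList (c :: r) = (c.toNat : Int) :: aList r := by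
  rw [aList.eq_def]; simp [hc]

theorem aList_bs_nil : aList ['\\'] = [92] := by rw [aList.eq_def]; simp

theorem aList_bs_bs (r : List Char) : aList ('\\' :: '\\' :: r) = 92 :: aList r := by
  rw [aList.eq_def]; simp

theorem aList_bs_q (r : List Char) : aList ('\\' :: '"' :: r) = 34 :: aList r := by
  rw [aList.eq_def]; simp

theorem aList_bs_n (r : List Char) : aList ('\\' :: 'n' :: r) = 10 :: aList r := by
  rw [aList.eq_def]; simp

theorem aList_bs_t (r : List Char) : aList ('\\' :: 't' :: r) = 9 :: aList r := by
  rw [aList.eq_def]; simp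

theorem aList_bs_unk {d : Char} (r : List Char) (h1 : ¬d = '\\') (h2 : ¬d = '"') (h3 : ¬d = 'n')
    (h4 : ¬d = 't') (h5 : pvOct.contains d = false) :
    aList ('\\' :: d :: r) = 92 :: aList (d :: r) := by
  have h5m : d ∉ pvOct := by simpa using h5
  rw [aList.eq_def]; simp [h1, h2, h3, h4, h5m]

theorem aList_oct0 {d : Char} (hd : pvOct.contains d = true) :
    aList ['\\', d] = [(d.toNat : Int) - 48] := by
  obtain ⟨h1, h2, h3, h4⟩ := pvOct_ne hd
  have hdm : d ∈ pvOct := by simpa using hd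
  rw [aList.eq_def]; simp [h1, h2, h3, h4, hdm]

theorem aList_oct1 {d e : Char} (r : List Char) (hd : pvOct.contains d = true)
    (he : pvOct.contains e = false) :
    aList ('\\' :: d :: e :: r) = ((d.toNat : Int) - 48) :: aList (e :: r) := by
  obtain ⟨h1, h2, h3, h4⟩ := pvOct_ne hd
  have hdm : d ∈ pvOct := by simpa using hd
  have hem : e ∉ pvOct := by simpa using he
  rw [aList.eq_def]; simp [h1, h2, h3, h4, hdm, hem]

theorem aList_oct2nil {d e : Char} (hd : pvOct.contains d = true) (he : pvOct.contains e = true) :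
    aList ['\\', d, e] = [((d.toNat : Int) - 48) * 8 + ((e.toNat : Int) - 48)] := by
  obtain ⟨h1, h2, h3, h4⟩ := pvOct_ne hd
  have hdm : d ∈ pvOct := by simpa using hd
  have hem : e ∈ pvOct := by simpa using he
  rw [aList.eq_def]; simp [h1, h2, h3, h4, hdm, hem]

theorem aList_oct2 {d e f : Char} (r : List Char) (hd : pvOct.contains d = true)
    (he : pvOct.contains e = true) (hf : pvOct.contains f = false) :
    aList ('\\' :: d :: e :: f :: r)
      = (((d.toNat : Int) - 48) * 8 + ((e.toNat : Int) - 48)) :: aList (f :: r) := by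
  obtain ⟨h1, h2, h3, h4⟩ := pvOct_ne hd
  have hdm : d ∈ pvOct := by simpa using hd
  have hem : e ∈ pvOct := by simpa using he
  have hfm : f ∉ pvOct := by simpa using hf
  rw [aList.eq_def]; simp [h1, h2, h3, h4, hdm, hem, hfm]

theorem aList_oct3 {d e f : Char} (r : List Char) (hd : pvOct.contains d = true)
    (he : pvOct.contains e = true) (hf : pvOct.contains f = true) :
    aList ('\\' :: d :: e :: f :: r)
      = ((((d.toNat : Int) - 48) * 8 + ((e.toNat : Int) - 48)) * 8 + ((f.toNat : Int) - 48)) :: aList r := by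
  obtain ⟨h1, h2, h3, h4⟩ := pvOct_ne hd
  have hdm : d ∈ pvOct := by simpa using hd
  have hem : e ∈ pvOct := by simpa using he
  have hfm : f ∈ pvOct := by simpa using hf
  rw [aList.eq_def]; simp [h1, h2, h3, h4, hdm, hem, hfm]

-- controlled unfolding of bLoop
theorem bLoop_nil : bLoop [] = [] := by simp [bLoop]

theorem bLoop_empty_nil : bLoop [[]] = [92] := by simp [bLoop]

theorem bLoop_empty_cons (lit : List Char) (rest : List (List Char)) :
    bLoop ([] :: lit :: rest) = 92 :: ((lit.map fun c => (c.toNat : Int)) ++ bLoop rest) := by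
  simp [bLoop]

theorem bLoop_q (p : List Char) (rest : List (List Char)) :
    bLoop (('"' :: p) :: rest) = 34 :: ((p.map fun c => (c.toNat : Int)) ++ bLoop rest) := by
  simp [bLoop]

theorem bLoop_n (p : List Char) (rest : List (List Char)) :
    bLoop (('n' :: p) :: rest) = 10 :: ((p.map fun c => (c.toNat : Int)) ++ bLoop rest) := by
  simp [bLoop]

theorem bLoop_t (p : List Char) (rest : List (List Char)) :
    bLoop (('t' :: p) :: rest) = 9 :: ((p.map fun c => (c.toNat : Int)) ++ bLoop rest) := by
  simp [bLoop]

theorem bLoop_unk {c : Char} (p : List Char) (rest : List (List Char)) (h2 : ¬c = '"')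
    (h3 : ¬c = 'n') (h4 : ¬c = 't') (h5 : pvOct.contains c = false) :
    bLoop ((c :: p) :: rest) = 92 :: (((c :: p).map fun c => (c.toNat : Int)) ++ bLoop rest) := by
  have h5m : c ∉ pvOct := by simpa using h5
  simp [bLoop, h2, h3, h4, h5m]

theorem bLoop_oct0 {c : Char} (rest : List (List Char)) (hc : pvOct.contains c = true) :
    bLoop ([c] :: rest) = ((c.toNat : Int) - 48) :: bLoop rest := by
  obtain ⟨h1, h2, h3, h4⟩ := pvOct_ne hc
  have hcm : c ∈ pvOct := by simpa using hc
  simp [bLoop, h2, h3, h4, hcm]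

theorem bLoop_oct1 {c d : Char} (p2 : List Char) (rest : List (List Char))
    (hc : pvOct.contains c = true) (hd : pvOct.contains d = false) :
    bLoop ((c :: d :: p2) :: rest)
      = ((c.toNat : Int) - 48) :: (((d :: p2).map fun c => (c.toNat : Int)) ++ bLoop rest) := by
  obtain ⟨h1, h2, h3, h4⟩ := pvOct_ne hc
  have hcm : c ∈ pvOct := by simpa using hc
  have hdm : d ∉ pvOct := by simpa using hd
  simp [bLoop, h2, h3, h4, hcm, hdm]

theorem bLoop_oct2nil {c d : Char} (rest : List (List Char))
    (hc : pvOct.contains c = true) (hd : pvOct.contains d = true) :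
    bLoop ([c, d] :: rest)
      = (((c.toNat : Int) - 48) * 8 + ((d.toNat : Int) - 48)) :: bLoop rest := by
  obtain ⟨h1, h2, h3, h4⟩ := pvOct_ne hc
  have hcm : c ∈ pvOct := by simpa using hc
  have hdm : d ∈ pvOct := by simpa using hd
  simp [bLoop, h2, h3, h4, hcm, hdm]

theorem bLoop_oct2 {c d e : Char} (p3 : List Char) (rest : List (List Char))
    (hc : pvOct.contains c = true) (hd : pvOct.contains d = true) (he : pvOct.contains e = false) :
    bLoop ((c :: d :: e :: p3) :: rest)
      = (((c.toNat : Int) - 48) * 8 + ((d.toNat : Int) - 48))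
          :: (((e :: p3).map fun c => (c.toNat : Int)) ++ bLoop rest) := by
  obtain ⟨h1, h2, h3, h4⟩ := pvOct_ne hc
  have hcm : c ∈ pvOct := by simpa using hc
  have hdm : d ∈ pvOct := by simpa using hd
  have hem : e ∉ pvOct := by simpa using he
  simp [bLoop, h2, h3, h4, hcm, hdm, hem]

theorem bLoop_oct3 {c d e : Char} (p3 : List Char) (rest : List (List Char))
    (hc : pvOct.contains c = true) (hd : pvOct.contains d = true) (he : pvOct.contains e = true) :
    bLoop ((c :: d :: e :: p3) :: rest)
      = ((((c.toNat : Int) - 48) * 8 + ((d.toNat : Int) - 48)) * 8 + ((e.toNat : Int) - 48))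
          :: ((p3.map fun c => (c.toNat : Int)) ++ bLoop rest) := by
  obtain ⟨h1, h2, h3, h4⟩ := pvOct_ne hc
  have hcm : c ∈ pvOct := by simpa using hc
  have hdm : d ∈ pvOct := by simpa using hd
  have hem : e ∈ pvOct := by simpa using he
  simp [bLoop, h2, h3, h4, hcm, hdm, hem]

theorem mySplit_bs (rest : List Char) : mySplit ('\\' :: rest) = [] :: mySplit rest := by
  simp [mySplit]

theorem mySplit_cons {c : Char} {rest p : List Char} {ps : List (List Char)} (hc : ¬c = '\\')
    (hms : mySplit rest = p :: ps) : mySplit (c :: rest) = (c :: p) :: ps := by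
  simp [mySplit, hc, hms]

theorem mySplit_dest (cs : List Char) : ∃ p ps, mySplit cs = p :: ps := by
  cases h : mySplit cs with
  | nil => exact absurd h (mySplit_ne_nil cs)
  | cons a b => exact ⟨a, b, rfl⟩

theorem bAll_cons (p : List Char) (ps : List (List Char)) :
    bAll (p :: ps) = (p.map fun c => (c.toNat : Int)) ++ bLoop ps := rfl

theorem bCD (n : Nat) : ∀ cs : List Char, cs.length ≤ n →
    bAll (mySplit cs) = aList cs ∧ bLoop (mySplit cs) = aList ('\\' :: cs) := by
  induction n with
  | zero =>
    intro cs h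
    have hcs : cs = [] := by cases cs with | nil => rfl | cons a b => simp at h
    subst hcs
    constructor
    · simp [mySplit, bAll_cons, bLoop_nil, aList_nil]
    · simp [mySplit, bLoop_empty_nil, aList_bs_nil]
  | succ n ih =>
    intro cs hlen
    have hC : ∀ t : List Char, t.length ≤ n → bAll (mySplit t) = aList t := fun t ht => (ih t ht).1
    have hD : ∀ t : List Char, t.length ≤ n → bLoop (mySplit t) = aList ('\\' :: t) :=
      fun t ht => (ih t ht).2
    constructor
    · cases cs with
      | nil => simp [mySplit, bAll_cons, bLoop_nil, aList_nil]
      | cons c rest =>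
        have hr : rest.length ≤ n := by simp at hlen; omega
        by_cases hc : c = '\\'
        · subst hc
          rw [mySplit_bs]
          obtain ⟨p, ps, hms⟩ := mySplit_dest rest
          rw [hms, bAll_cons]
          simp only [List.map_nil, List.nil_append]
          rw [← hms, hD rest hr]
        · obtain ⟨p, ps, hms⟩ := mySplit_dest rest
          rw [mySplit_cons hc hms, bAll_cons, aList_cons_ne hc, ← hC rest hr, hms, bAll_cons]
          simp
    · cases cs with
      | nil => simp [mySplit, bLoop_empty_nil, aList_bs_nil]
      | cons c rest =>
        have hr : rest.length ≤ n := by simp at hlen; omega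
        by_cases hc : c = '\\'
        · subst hc
          rw [mySplit_bs]
          obtain ⟨p, ps, hms⟩ := mySplit_dest rest
          rw [hms, bLoop_empty_cons, aList_bs_bs, ← hC rest hr, hms, bAll_cons]
        · by_cases hq : c = '"'
          · subst hq
            obtain ⟨p, ps, hms⟩ := mySplit_dest rest
            rw [mySplit_cons hc hms, bLoop_q, aList_bs_q, ← hC rest hr, hms, bAll_cons]
          · by_cases hn : c = 'n'
            · subst hn
              obtain ⟨p, ps, hms⟩ := mySplit_dest rest
              rw [mySplit_cons hc hms, bLoop_n, aList_bs_n, ← hC rest hr, hms, bAll_cons]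
            · by_cases ht : c = 't'
              · subst ht
                obtain ⟨p, ps, hms⟩ := mySplit_dest rest
                rw [mySplit_cons hc hms, bLoop_t, aList_bs_t, ← hC rest hr, hms, bAll_cons]
              · by_cases ho : pvOct.contains c = true
                · -- octal escape: analyse the shape of rest
                  cases rest with
                  | nil =>
                    have hms : mySplit ([] : List Char) = [] :: [] := by simp [mySplit]
                    rw [mySplit_cons hc hms, bLoop_oct0 _ ho, bLoop_nil, aList_oct0 ho]
                  | cons d rest2 =>
                    have hr2 : rest2.length ≤ n := by simp at hlen; omega
                    by_cases hd : d = '\\'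
                    · subst hd
                      obtain ⟨q, qs, hms2⟩ := mySplit_dest rest2
                      have hms : mySplit ('\\' :: rest2) = [] :: q :: qs := by
                        rw [mySplit_bs, hms2]
                      rw [mySplit_cons hc hms, bLoop_oct0 _ ho, ← hms2, hD rest2 hr2,
                          aList_oct1 _ ho pvOct_bs]
                    · by_cases hod : pvOct.contains d = true
                      · cases rest2 with
                        | nil =>
                          have hms : mySplit [d] = [d] :: [] := by
                            simp [mySplit, hd]
                          rw [mySplit_cons hc hms, bLoop_oct2nil _ ho hod, bLoop_nil,
                              aList_oct2nil ho hod]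
                        | cons e rest3 =>
                          have hr3 : rest3.length ≤ n := by simp at hlen; omega
                          by_cases he : e = '\\'
                          · subst he
                            obtain ⟨q, qs, hms3⟩ := mySplit_dest rest3
                            have hms : mySplit (d :: '\\' :: rest3) = [d] :: q :: qs :=
                              mySplit_cons hd (by rw [mySplit_bs, hms3])
                            rw [mySplit_cons hc hms, bLoop_oct2nil _ ho hod, ← hms3,
                                hD rest3 hr3, aList_oct2 _ ho hod pvOct_bs]
                          · by_cases hoe : pvOct.contains e = true
                            · obtain ⟨q, qs, hms3⟩ := mySplit_dest rest3
                              have hms : mySplit (d :: e :: rest3) = (d :: e :: q) :: qs :=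
                                mySplit_cons hd (mySplit_cons he hms3)
                              rw [mySplit_cons hc hms, bLoop_oct3 _ _ ho hod hoe,
                                  aList_oct3 _ ho hod hoe, ← hC rest3 hr3, hms3, bAll_cons]
                            · have hre : (e :: rest3).length ≤ n := by simp at hlen; omega
                              obtain ⟨q, qs, hms3⟩ := mySplit_dest rest3
                              have hmse : mySplit (e :: rest3) = (e :: q) :: qs :=
                                mySplit_cons he hms3
                              have hms : mySplit (d :: e :: rest3) = (d :: e :: q) :: qs :=
                                mySplit_cons hd hmse
                              rw [mySplit_cons hc hms, bLoop_oct2 _ _ ho hod (by simpa using hoe),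
                                  aList_oct2 _ ho hod (by simpa using hoe),
                                  ← hC (e :: rest3) hre, hmse, bAll_cons]
                      · -- d ordinary: escape is the single digit, d starts the literal tail
                        have hrd : (d :: rest2).length ≤ n := by simp at hlen; omega
                        obtain ⟨q, qs, hms2⟩ := mySplit_dest rest2
                        have hmsd : mySplit (d :: rest2) = (d :: q) :: qs := mySplit_cons hd hms2
                        rw [mySplit_cons hc hmsd, bLoop_oct1 _ _ ho (by simpa using hod),
                            aList_oct1 _ ho (by simpa using hod), ← hC (d :: rest2) hrd, hmsd,
                            bAll_cons]
                · -- unknown escape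
                  obtain ⟨p, ps, hms⟩ := mySplit_dest rest
                  rw [mySplit_cons hc hms,
                      bLoop_unk _ _ hq hn ht (by simpa using ho),
                      aList_bs_unk _ hc hq hn ht (by simpa using ho), aList_cons_ne hc,
                      ← hC rest hr, hms, bAll_cons]
                  simp

theorem bAll_eq_aList : ∀ (cs : List Char), bAll (mySplit cs) = aList cs :=
  fun cs => (bCD cs.length cs le_rfl).1

-- ===== A side =====

theorem octParse1 {d : Char} (hd : pvOct.contains d = true) :
    (PySem.Int.ofCharsBase? [d] 8).getD 0 = (d.toNat : Int) - 48 := by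
  have hm : d ∈ pvOct := by simpa using hd
  fin_cases hm <;> decide

theorem octParse2 {d e : Char} (hd : pvOct.contains d = true) (he : pvOct.contains e = true) :
    (PySem.Int.ofCharsBase? [d, e] 8).getD 0
      = ((d.toNat : Int) - 48) * 8 + ((e.toNat : Int) - 48) := by
  have hm : d ∈ pvOct := by simpa using hd
  have hm2 : e ∈ pvOct := by simpa using he
  fin_cases hm <;> fin_cases hm2 <;> decide

theorem octParse3 {d e f : Char} (hd : pvOct.contains d = true) (he : pvOct.contains e = true)
    (hf : pvOct.contains f = true) :
    (PySem.Int.ofCharsBase? [d, e, f] 8).getD 0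
      = (((d.toNat : Int) - 48) * 8 + ((e.toNat : Int) - 48)) * 8 + ((f.toNat : Int) - 48) := by
  have hm : d ∈ pvOct := by simpa using hd
  have hm2 : e ∈ pvOct := by simpa using he
  have hm3 : f ∈ pvOct := by simpa using hf
  fin_cases hm <;> fin_cases hm2 <;> fin_cases hm3 <;> decide

theorem drop_getD {cs : List Char} {i : Nat} (h : i < cs.length) :
    cs.drop i = cs.getD i ' ' :: cs.drop (i + 1) := by
  rw [List.getD_eq_getElem cs ' ' h]
  exact List.drop_eq_getElem_cons h

theorem aEnd_char (cs : List Char) (i : Nat) : aEndLoop cs i (i + 2) =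
    if i + 2 < cs.length ∧ pvOct.contains (cs.getD (i + 2) ' ') = true then
      (if i + 3 < cs.length ∧ pvOct.contains (cs.getD (i + 3) ' ') = true then i + 4 else i + 3)
    else i + 2 := by
  rw [aEndLoop]
  by_cases h2 : i + 2 < cs.length ∧ pvOct.contains (cs.getD (i + 2) ' ') = true
  · rw [dif_pos ⟨h2.1, by omega, h2.2⟩, if_pos h2]
    have e1 : i + 2 + 1 = i + 3 := by omega
    rw [e1, aEndLoop]
    by_cases h3 : i + 3 < cs.length ∧ pvOct.contains (cs.getD (i + 3) ' ') = true
    · rw [dif_pos ⟨h3.1, by omega, h3.2⟩, if_pos h3]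
      have e2 : i + 3 + 1 = i + 4 := by omega
      rw [e2, aEndLoop, dif_neg (by rintro ⟨_, hx, _⟩; omega)]
    · rw [dif_neg (by rintro ⟨a, _, b⟩; exact h3 ⟨a, b⟩), if_neg h3]
  · rw [dif_neg (by rintro ⟨a, _, b⟩; exact h2 ⟨a, b⟩), if_neg h2]

theorem aLoop_eq_drop (n : Nat) : ∀ (cs : List Char) (i : Nat) (out : List Int),
    cs.length - i ≤ n → aLoop cs i out = out ++ aList (cs.drop i) := by
  induction n with
  | zero =>
    intro cs i out h
    rw [aLoop, dif_neg (by omega), List.drop_of_length_le (by omega), aList_nil,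
        List.append_nil]
  | succ n ih =>
    intro cs i out h
    by_cases hl : i < cs.length
    · rw [aLoop, dif_pos hl]
      by_cases hbs : cs.getD i ' ' = '\\' ∧ i + 1 < cs.length
      · rw [if_pos hbs]
        rw [drop_getD hl, hbs.1, drop_getD hbs.2]
        by_cases h1 : cs.getD (i + 1) ' ' = '\\'
        · rw [if_pos h1, ih cs (i + 2) _ (by omega), h1, aList_bs_bs]
          simp
        · rw [if_neg h1]
          by_cases h2 : cs.getD (i + 1) ' ' = '"'
          · rw [if_pos h2, ih cs (i + 2) _ (by omega), h2, aList_bs_q]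
            simp
          · rw [if_neg h2]
            by_cases h3 : cs.getD (i + 1) ' ' = 'n'
            · rw [if_pos h3, ih cs (i + 2) _ (by omega), h3, aList_bs_n]
              simp
            · rw [if_neg h3]
              by_cases h4 : cs.getD (i + 1) ' ' = 't'
              · rw [if_pos h4, ih cs (i + 2) _ (by omega), h4, aList_bs_t]
                simp
              · rw [if_neg h4]
                by_cases h5 : pvOct.contains (cs.getD (i + 1) ' ') = true
                · rw [if_pos h5, aEnd_char cs i]
                  by_cases hc2 : i + 2 < cs.length ∧ pvOct.contains (cs.getD (i + 2) ' ') = true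
                  · rw [if_pos hc2]
                    by_cases hc3 : i + 3 < cs.length ∧ pvOct.contains (cs.getD (i + 3) ' ') = true
                    · rw [if_pos hc3, PySem.List.slice_natCast,
                          show i + 4 - (i + 1) = 3 from by omega, drop_getD hbs.2,
                          drop_getD hc2.1, drop_getD hc3.1]
                      simp only [List.take_succ_cons, List.take_zero]
                      rw [octParse3 h5 hc2.2 hc3.2, ih cs (i + 4) _ (by omega),
                          aList_oct3 _ h5 hc2.2 hc3.2]
                      simp [show i + 3 + 1 = i + 4 from by omega]
                    · rw [if_neg hc3, PySem.List.slice_natCast,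
                          show i + 3 - (i + 1) = 2 from by omega, drop_getD hbs.2,
                          drop_getD hc2.1]
                      simp only [List.take_succ_cons, List.take_zero]
                      rw [octParse2 h5 hc2.2, ih cs (i + 3) _ (by omega)]
                      by_cases hl3 : i + 3 < cs.length
                      · have hno : pvOct.contains (cs.getD (i + 3) ' ') = false := by
                          rcases Bool.eq_false_or_eq_true (pvOct.contains (cs.getD (i + 3) ' '))
                            with hx | hx
                          · exact absurd ⟨hl3, hx⟩ hc3
                          · exact hx
                        rw [show i + 2 + 1 = i + 3 from by omega, drop_getD hl3,
                            aList_oct2 _ h5 hc2.2 hno]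
                        simp [show i + 3 + 1 = i + 4 from by omega]
                      · rw [show i + 2 + 1 = i + 3 from by omega,
                            List.drop_of_length_le (l := cs) (by omega), aList_oct2nil h5 hc2.2]
                        simp [aList_nil]
                  · rw [if_neg hc2, PySem.List.slice_natCast,
                        show i + 2 - (i + 1) = 1 from by omega, drop_getD hbs.2]
                    simp only [List.take_succ_cons, List.take_zero]
                    rw [octParse1 h5, ih cs (i + 2) _ (by omega)]
                    by_cases hl2 : i + 2 < cs.length
                    · have hno : pvOct.contains (cs.getD (i + 2) ' ') = false := by
                        rcases Bool.eq_false_or_eq_true (pvOct.contains (cs.getD (i + 2) ' '))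
                          with hx | hx
                        · exact absurd ⟨hl2, hx⟩ hc2
                        · exact hx
                      rw [show i + 1 + 1 = i + 2 from by omega, drop_getD hl2,
                          aList_oct1 _ h5 hno]
                      simp [show i + 2 + 1 = i + 3 from by omega]
                    · rw [show i + 1 + 1 = i + 2 from by omega,
                          List.drop_of_length_le (l := cs) (by omega), aList_oct0 h5]
                      simp [aList_nil]
                · have h5f : pvOct.contains (cs.getD (i + 1) ' ') = false := by
                    simpa using h5
                  rw [if_neg h5, ih cs (i + 1) _ (by omega), drop_getD hbs.2,
                      aList_bs_unk _ h1 h2 h3 h4 h5f]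
                  simp
      · rw [if_neg hbs, ih cs (i + 1) _ (by omega), drop_getD hl]
        by_cases hb2 : cs.getD i ' ' = '\\'
        · have hge : cs.length ≤ i + 1 := by
            by_contra hx
            exact hbs ⟨hb2, by omega⟩
          rw [hb2, List.drop_of_length_le hge, aList_bs_nil, aList_nil]
          simp
        · rw [aList_cons_ne hb2]
          simp
    · rw [aLoop, dif_neg hl, List.drop_of_length_le (by omega), aList_nil, List.append_nil]

theorem aLoop_eq_aList (cs : List Char) : aLoop cs 0 [] = aList cs := by
  rw [aLoop_eq_drop cs.length cs 0 [] (by omega)]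
  simp


-- ===== VERDICT (by name: the statement is the Claim_ definition above) =====
theorem unquote_path_py_spec : Claim_equal_unquote_path_py := by
  intro raw _ _
  unfold Spec_unquote_path_py unquote_path_py unquote_path_py_alt
  by_cases h1 : PySem.Chars.startswith raw.toList ['"'] = true ∧ PySem.Chars.endswith raw.toList ['"'] = true
  · rw [if_neg (by simp [h1.1, h1.2]), if_neg (by simp [h1.1, h1.2])]
    simp only [splitOn_eq_mySplit, aLoop_eq_aList, ← bAll_eq_aList, bAll]
  · by_cases hs : PySem.Chars.startswith raw.toList ['"'] = true
    · have he : PySem.Chars.endswith raw.toList ['"'] = false := by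
        rcases Bool.eq_false_or_eq_true (PySem.Chars.endswith raw.toList ['"']) with hx | hx
        · exact absurd ⟨hs, hx⟩ h1
        · exact hx
      rw [if_pos (by simp [he]), if_pos (by simp [he])]
    · rw [Bool.not_eq_true] at hs
      rw [if_pos (by simp [hs]), if_pos (by simp [hs])]
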